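-- pv_equiv track=rewrite | github.com/d-ataman/lmm | onmt/io/Wordbatch.py | segment_into_trigrams
-- ===== SOURCE A (Python) =====
-- def segment_into_trigrams(inputbatch):
--     newbatch = []
--     lengths = []
--     for line in inputbatch:
--         sen = []
--         for w in line:
--             trigrams = []
--             l = int(w.__len__())
--             for i in range(0, l):
--                 if l == 1:
--                     trigram = ''.join(('^', w[0], '$'))
--                     trigrams.append(trigram)
--                 else:
--                     if i == 0:
--                         trigram = ''.join(('^', w[0], w[1]))
--                         trigrams.append(trigram)
--                     else:
--                         if i == l - 1:
--                             trigram = ''.join((w[l - 2], w[l - 1], '$'))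
--                             trigrams.append(trigram)
--                         else:
--                             trigram = ''.join((w[i - 1], w[i], w[i + 1]))
--                             trigrams.append(trigram)
--             trigrams.append('$$$')
--             sen.append(trigrams)
--             lengths += [len(trigrams)]
--         newbatch.append(sen)
--
--     return tuple(newbatch), lengths
-- ===== SOURCE B (Python) =====
-- def segment_into_trigrams(inputbatch):
--     def tri(w):
--         padded = ['^'] + list(w) + ['$']
--         return [''.join(padded[i:i + 3]) for i in range(len(w))] + ['$$$']
--     newbatch = [[tri(w) for w in line] for line in inputbatch]
--     lengths = [len(w) + 1 for line in inputbatch for w in line]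
--     return tuple(newbatch), lengths
-- ===== Notes on version B (the rewrite author's own statement) =====
-- stated objective: simpler
-- what changed: Replaces the four-way positional conditional with a uniform sliding-window slice over a '^'/'$'-padded character list, builds the batch with nested comprehensions, and computes each length as len(w)+1 in closed form instead of measuring the built list.
import Mathlib
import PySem

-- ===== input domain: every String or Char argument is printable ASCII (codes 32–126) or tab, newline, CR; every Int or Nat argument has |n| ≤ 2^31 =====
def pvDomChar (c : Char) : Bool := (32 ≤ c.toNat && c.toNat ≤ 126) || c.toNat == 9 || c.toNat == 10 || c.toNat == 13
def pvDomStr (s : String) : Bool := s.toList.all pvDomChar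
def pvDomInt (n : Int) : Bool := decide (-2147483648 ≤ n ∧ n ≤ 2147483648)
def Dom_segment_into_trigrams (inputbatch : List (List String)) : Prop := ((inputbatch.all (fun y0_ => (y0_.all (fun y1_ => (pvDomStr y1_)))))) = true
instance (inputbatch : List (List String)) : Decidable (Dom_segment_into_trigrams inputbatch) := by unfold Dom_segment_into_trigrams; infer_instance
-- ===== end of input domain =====

-- B replaces A's four-way positional conditional with one sliding-window slice over a
-- '^'/'$'-padded character list and computes each recorded length as len(w)+1 in closed form
-- (objective: simpler; same asymptotic cost).

-- ===== PORT A =====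
-- w[i] would raise IndexError out of range; every index A uses is in range, so the getD default is never hit
def pvCharAt (w : String) (i : Int) : Char := (PySem.Str.pyGet? w i).getD ' '

def pvTriA (w : String) : List String :=
  let l : Int := PySem.Str.len w
  let trigrams : List String :=
    (PySem.List.pyRange 0 l 1).foldl (fun trigrams i =>
      trigrams ++ [
        if l = 1 then String.ofList ['^', pvCharAt w 0, '$']
        else if i = 0 then String.ofList ['^', pvCharAt w 0, pvCharAt w 1]
        else if i = l - 1 then String.ofList [pvCharAt w (l - 2), pvCharAt w (l - 1), '$']
        else String.ofList [pvCharAt w (i - 1), pvCharAt w i, pvCharAt w (i + 1)]]) []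
  trigrams ++ ["$$$"]

def segment_into_trigrams (inputbatch : List (List String)) : List (List (List String)) × List Int :=
  inputbatch.foldl (fun acc line =>
    let r := line.foldl (fun (acc2 : List (List String) × List Int) w =>
      let trigrams := pvTriA w
      (acc2.1 ++ [trigrams], acc2.2 ++ [(trigrams.length : Int)])) ([], acc.2)
    (acc.1 ++ [r.1], r.2)) ([], [])

-- ===== PORT B =====
def pvTriB (w : String) : List String :=
  let padded : List Char := ['^'] ++ w.toList ++ ['$']
  ((PySem.List.pyRange 0 (PySem.Str.len w) 1).map (fun i =>
      String.ofList (PySem.List.slice padded (some i) (some (i + 3))))) ++ ["$$$"]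

def segment_into_trigrams_alt (inputbatch : List (List String)) : List (List (List String)) × List Int :=
  (inputbatch.map (fun line => line.map pvTriB),
   inputbatch.flatMap (fun line => line.map (fun w => PySem.Str.len w + 1)))


-- ===== PRECONDITION & SPEC =====
def Spec_segment_into_trigrams (inputbatch : List (List String)) (out : List (List (List String)) × List Int) : Prop := out = segment_into_trigrams_alt inputbatch
instance (inputbatch : List (List String)) (out : List (List (List String)) × List Int) : Decidable (Spec_segment_into_trigrams inputbatch out) := by unfold Spec_segment_into_trigrams; infer_instance

-- ===== CLAIM (what is proved, stated in full; the proofs are below) =====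
def Claim_equal_segment_into_trigrams : Prop := ∀ (inputbatch : List (List String)), Dom_segment_into_trigrams inputbatch → Spec_segment_into_trigrams inputbatch (segment_into_trigrams inputbatch)

-- ===== LEMMAS AND PROOFS =====

lemma charAt_getD (w : String) (i : Int) (h : 0 ≤ i) :
    pvCharAt w i = w.toList.getD i.toNat ' ' := by
  simp only [pvCharAt, PySem.Str.pyGet?_eq, PySem.Chars.pyGet?_eq_listPyGet?]
  rw [PySem.List.pyGet?_of_nonneg _ h, ← List.getD_eq_getElem?_getD]

lemma take3_drop {α : Type} (d : α) (p : List α) (j : Nat) (h1 : j + 3 ≤ p.length) :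
    (p.drop j).take 3 = [p.getD j d, p.getD (j + 1) d, p.getD (j + 2) d] := by
  rw [List.drop_eq_getElem_cons (by omega), List.drop_eq_getElem_cons (by omega),
    List.drop_eq_getElem_cons (by omega)]
  simp only [show j + 1 + 1 = j + 2 from by omega, List.take_succ_cons, List.take_zero]
  simp [List.getD_eq_getElem?_getD,
    List.getElem?_eq_getElem (show j < p.length from by omega),
    List.getElem?_eq_getElem (show j + 1 < p.length from by omega),
    List.getElem?_eq_getElem (show j + 2 < p.length from by omega)]

lemma padded_get_succ (cs : List Char) (k : Nat) (hk : k < cs.length) :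
    ('^' :: (cs ++ ['$'])).getD (k + 1) ' ' = cs.getD k ' ' := by
  rw [List.getD_cons_succ, List.getD_eq_getElem?_getD, List.getElem?_append_left hk,
    ← List.getD_eq_getElem?_getD]

lemma padded_get_last (cs : List Char) :
    ('^' :: (cs ++ ['$'])).getD (cs.length + 1) ' ' = '$' := by
  rw [List.getD_cons_succ, List.getD_eq_getElem?_getD, List.getElem?_append_right (le_refl _)]
  simp

lemma tri_eq (w : String) : pvTriA w = pvTriB w := by
  unfold pvTriA pvTriB
  simp only [PySem.List.foldl_append_singleton_eq_map, List.nil_append, PySem.Str.len_eq]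
  congr 1
  apply List.map_congr_left
  intro i hi
  rw [PySem.List.mem_pyRange_one] at hi
  obtain ⟨h0, hn⟩ := hi
  lift i to ℕ using h0 with j
  set cs := w.toList with hcs
  have hj : j < cs.length := by exact_mod_cast hn
  -- B side: the slice is three getD's
  have hB : PySem.List.slice (['^'] ++ cs ++ ['$']) (some (j : Int)) (some ((j : Int) + 3))
      = [('^' :: (cs ++ ['$'])).getD j ' ', ('^' :: (cs ++ ['$'])).getD (j + 1) ' ',
         ('^' :: (cs ++ ['$'])).getD (j + 2) ' '] := by
    rw [PySem.List.slice_toNat _ (by omega) (by omega)]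
    have e1 : ((j : Int) + 3).toNat = j + 3 := by omega
    have e2 : ((j : Int)).toNat = j := by omega
    rw [e1, e2, show j + 3 - j = 3 from by omega]
    have hpp : (['^'] ++ cs ++ ['$']) = ('^' :: (cs ++ ['$'])) := by simp
    rw [hpp, take3_drop ' ' _ j (by simp; omega)]
  rw [hB]
  by_cases h1 : cs.length = 1
  · rw [if_pos (by exact_mod_cast h1)]
    have hz : j = 0 := by omega
    subst hz
    rw [charAt_getD w 0 (by norm_num), show ((0:Int)).toNat = 0 from rfl,
      padded_get_succ cs 0 (by omega),
      show (0:Nat) + 2 = cs.length + 1 from by omega, padded_get_last cs]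
    simp [← hcs]
  · rw [if_neg (by exact_mod_cast h1)]
    have h2 : 2 ≤ cs.length := by omega
    by_cases hz : j = 0
    · subst hz
      rw [if_pos (by simp)]
      rw [charAt_getD w 0 (by norm_num), charAt_getD w 1 (by norm_num)]
      rw [show ((0:Int)).toNat = 0 from rfl, show ((1:Int)).toNat = 1 from rfl]
      rw [padded_get_succ cs 0 (by omega),
        show (0:Nat) + 2 = 1 + 1 from rfl, padded_get_succ cs 1 (by omega)]
      simp [← hcs]
    · rw [if_neg (by omega)]
      by_cases he : j = cs.length - 1
      · rw [if_pos (by omega)]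
        rw [show ((cs.length : Int) - 2) = ((cs.length - 2 : Nat) : Int) from by omega,
          show ((cs.length : Int) - 1) = ((cs.length - 1 : Nat) : Int) from by omega,
          charAt_getD w _ (by omega), charAt_getD w _ (by omega)]
        simp only [Int.toNat_natCast]
        rw [show j = (cs.length - 2) + 1 from by omega]
        rw [padded_get_succ cs _ (by omega)]
        rw [show cs.length - 2 + 1 + 1 = (cs.length - 1) + 1 from by omega]
        rw [padded_get_succ cs _ (by omega)]
        rw [show cs.length - 2 + 1 + 2 = cs.length + 1 from by omega]
        rw [padded_get_last cs]
      · rw [if_neg (by omega)]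
        have hge : 1 ≤ j := by omega
        have hlt : j + 1 < cs.length := by omega
        rw [show ((j : Int) - 1) = ((j - 1 : Nat) : Int) from by omega,
          show ((j : Int) + 1) = ((j + 1 : Nat) : Int) from by push_cast; ring,
          charAt_getD w _ (by omega), charAt_getD w _ (by omega), charAt_getD w _ (by omega)]
        simp only [Int.toNat_natCast]
        rw [show j = (j - 1) + 1 from by omega, padded_get_succ cs _ (by omega)]
        rw [show j - 1 + 1 + 1 = j + 1 from by omega, padded_get_succ cs _ (by omega),
          show j - 1 + 1 + 2 = (j + 1) + 1 from by omega, padded_get_succ cs _ (by omega)]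
        simp [← hcs, show j - 1 + 1 = j from by omega]

lemma length_triB (w : String) : ((pvTriB w).length : Int) = PySem.Str.len w + 1 := by
  unfold pvTriB
  simp [PySem.List.length_pyRange_one, PySem.Str.len_eq]

lemma inner_fold (line : List String) (s : List (List String)) (L : List Int) :
    line.foldl (fun (acc2 : List (List String) × List Int) w =>
      let trigrams := pvTriA w
      (acc2.1 ++ [trigrams], acc2.2 ++ [(trigrams.length : Int)])) (s, L)
    = (s ++ line.map pvTriB, L ++ line.map (fun w => PySem.Str.len w + 1)) := by
  induction line generalizing s L with
  | nil => simp
  | cons w rest ih =>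
    simp only [List.foldl_cons, List.map_cons]
    rw [ih, tri_eq w, length_triB w]
    simp

lemma outer_fold (batch : List (List String)) (N : List (List (List String))) (L : List Int) :
    batch.foldl (fun acc line =>
      let r := line.foldl (fun (acc2 : List (List String) × List Int) w =>
        let trigrams := pvTriA w
        (acc2.1 ++ [trigrams], acc2.2 ++ [(trigrams.length : Int)])) ([], acc.2)
      (acc.1 ++ [r.1], r.2)) (N, L)
    = (N ++ batch.map (fun line => line.map pvTriB),
       L ++ batch.flatMap (fun line => line.map (fun w => PySem.Str.len w + 1))) := by
  induction batch generalizing N L with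
  | nil => simp
  | cons line rest ih =>
    simp only [List.foldl_cons]
    rw [show (List.foldl (fun (acc2 : List (List String) × List Int) w =>
        (acc2.1 ++ [pvTriA w], acc2.2 ++ [((pvTriA w).length : Int)])) ([], L) line)
      = (([] : List (List String)) ++ line.map pvTriB, L ++ line.map (fun w => PySem.Str.len w + 1))
      from inner_fold line [] L]
    rw [ih]
    simp


-- ===== VERDICT (by name: the statement is the Claim_ definition above) =====
theorem segment_into_trigrams_spec : Claim_equal_segment_into_trigrams := by
  intro b _
  unfold Spec_segment_into_trigrams segment_into_trigrams segment_into_trigrams_alt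
  rw [outer_fold]
  simp
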